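-- pv_equiv track=rewrite | github.com/KyounghoonLim/KyounghoonLim | Algorithm/CodingTest/GOODGANGLABS/3.py | solution
-- ===== SOURCE A (Python) =====
-- def find_index(my_num, target):
--     ### 상대방 배열 뒤에서부터 순회(list.pop() 최적화) ###
--     for i in range(len(target)-1, -1, -1):
--         ### 현재 내 숫자보다 크거나 같은 값 발견시 ###
--         if my_num <= target[i]:
--             ### 만약 내 숫자가 상대방의 가장 작은 숫자보다 작을 경우 루프 종료 ###
--             if i == len(target) - 1:
--                 break
--             return i + 1
--     ### 내 숫자보다 작은 값 존재하지 않을 경우 첫 번째 인덱스 반환 ###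
--     return 0
--
-- def solution(A, B):
--     answer = 0
--
--     ### 상대방 배열 내림차순, 내 배열 오름차순 정렬(list.pop() 최적화) ###
--     target = sorted(A, reverse=True)
--     my_nums = sorted(B)
--
--     for my_num in my_nums:
--         ### 내가 이길 수 있는 상대방의 값 인덱스 조회 ###
--         target_idx = find_index(my_num, target)
--         ### 상대방의 숫자가 나보다 작으면 ###
--         if my_num > target[target_idx]:
--             answer += 1
--         target.pop(target_idx)
--
--     return answer
-- ===== SOURCE B (Python) =====
-- def solution(A, B):
--     targets = sorted(A)
--     wins = 0
--     i = 0
--     for b in sorted(B):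
--         if i < len(targets) and targets[i] < b:
--             wins += 1
--             i += 1
--     return wins
-- ===== Notes on version B (the rewrite author's own statement) =====
-- stated objective: faster
-- what changed: Replaced the per-element backward scan plus list.pop on a descending copy with a single two-pointer sweep over both ascending-sorted lists, removing the O(n) inner scan and pop entirely.
import Mathlib
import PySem

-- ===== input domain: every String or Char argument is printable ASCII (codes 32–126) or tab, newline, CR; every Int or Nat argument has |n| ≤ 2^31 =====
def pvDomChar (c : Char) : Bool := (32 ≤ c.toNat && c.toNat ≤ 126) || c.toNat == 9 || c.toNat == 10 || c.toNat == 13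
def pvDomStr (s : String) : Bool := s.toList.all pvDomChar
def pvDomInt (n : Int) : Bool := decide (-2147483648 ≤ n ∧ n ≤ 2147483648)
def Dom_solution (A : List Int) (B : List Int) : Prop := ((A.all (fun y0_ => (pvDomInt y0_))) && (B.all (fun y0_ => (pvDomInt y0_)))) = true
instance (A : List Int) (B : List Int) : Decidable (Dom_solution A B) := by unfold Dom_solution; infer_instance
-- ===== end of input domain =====

-- B replaces A's per-element backward scan + pop on a descending copy by a two-pointer sweep
-- over both ascending-sorted lists (objective: faster, asymptotically).

-- ===== PORT A =====
-- loop 'for i in range(len(target)-1, -1, -1)' of find_index; every i produced by the range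
-- is a valid index of target, so pyGetD's default 0 is never consulted (exact there).
def findLoop (myNum : Int) (target : List Int) : List Int → Int
  | [] => 0
  | i :: is =>
      if myNum ≤ PySem.List.pyGetD target i 0 then
        (if i = (target.length : Int) - 1 then 0 else i + 1)
      else findLoop myNum target is

def find_index (myNum : Int) (target : List Int) : Int :=
  findLoop myNum target (PySem.List.pyRange ((target.length : Int) - 1) (-1) (-1))

-- Python raises IndexError at target[target_idx] / target.pop(target_idx) once target is
-- empty (only reachable when len(B) > len(A)); those inputs are excluded by Pre_solution,
-- so the getD fallbacks below are never consulted on admitted inputs.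
def solution (A : List Int) (B : List Int) : Int :=
  let target := PySem.List.sorted A (fun x => x) true
  let myNums := PySem.List.sorted B (fun x => x) false
  (myNums.foldl
    (fun (st : List Int × Int) myNum =>
      let targetIdx := find_index myNum st.1
      let answer := if PySem.List.pyGetD st.1 targetIdx 0 < myNum then st.2 + 1 else st.2
      let target' := ((PySem.List.pop? st.1 targetIdx).map Prod.snd).getD st.1
      (target', answer))
    (target, 0)).2

-- ===== PORT B =====
-- state st = (i, wins); one pass over sorted(B) with a pointer i into sorted(A).
def solution_alt (A : List Int) (B : List Int) : Int :=
  let targets := PySem.List.sorted A (fun x => x) false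
  ((PySem.List.sorted B (fun x => x) false).foldl
    (fun (st : Int × Int) b =>
      if st.1 < (targets.length : Int) ∧ PySem.List.pyGetD targets st.1 0 < b
      then (st.1 + 1, st.2 + 1) else st)
    (0, 0)).2

-- ===== PRECONDITION & SPEC =====
-- A pops one element of its copy of A per element of B and indexes into it first, so it
-- raises IndexError as soon as len(B) > len(A); Pre_ excludes exactly those inputs.
def Pre_solution (A : List Int) (B : List Int) : Prop := B.length ≤ A.length
instance (A : List Int) (B : List Int) : Decidable (Pre_solution A B) := by unfold Pre_solution; infer_instance
def pvWitness_solution : List Int × List Int := ([1, 2], [3])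

def Spec_solution (A : List Int) (B : List Int) (out : Int) : Prop := out = solution_alt A B
instance (A : List Int) (B : List Int) (out : Int) : Decidable (Spec_solution A B out) := by unfold Spec_solution; infer_instance

-- ===== CLAIM (what is proved, stated in full; the proofs are below) =====
def Claim_equal_solution : Prop := ∀ (A : List Int) (B : List Int), Dom_solution A B → Pre_solution A B → Spec_solution A B (solution A B)

-- ===== LEMMAS AND PROOFS =====

-- Abstract form of A's loop body on a descending target list: for the current b, either no
-- element is below b (sacrifice the head = maximum) or the largest element below b (head of
-- the dropWhile suffix) is removed and a win is counted.
def M : List Int → List Int → Int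
  | _, [] => 0
  | t, b :: bs =>
      match t.dropWhile (fun x => decide (b ≤ x)) with
      | [] => M (t.drop 1) bs
      | _ :: t2' => 1 + M (t.takeWhile (fun x => decide (b ≤ x)) ++ t2') bs

-- Abstract form of B's two-pointer sweep (both lists ascending).
def g : List Int → List Int → Int
  | _, [] => 0
  | [], _ :: bs => g [] bs
  | x :: a, b :: bs => if x < b then 1 + g a bs else g (x :: a) bs
  termination_by _ bs => bs.length

theorem forall2_of_mem {α : Type} {Q : α → α → Prop} :
    ∀ {u v : List α}, u.length = v.length → (∀ x ∈ u, ∀ y ∈ v, Q x y) → List.Forall₂ Q u v := by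
  intro u
  induction u with
  | nil =>
    intro v h _
    cases v with
    | nil => exact List.Forall₂.nil
    | cons y ys => simp at h
  | cons x xs ih =>
    intro v h hq
    cases v with
    | nil => simp at h
    | cons y ys =>
      exact List.Forall₂.cons (hq x (by simp) y (by simp))
        (ih (by simpa using h) (fun a ha b hb => hq a (by simp [ha]) b (by simp [hb])))

theorem forall2_takeWhile_dropWhile {α : Type} {Q : α → α → Prop} {p : α → Bool}
    {t t' : List α} (h : List.Forall₂ Q t t') (hp : ∀ x y, Q x y → p x = p y) :
    List.Forall₂ Q (t.takeWhile p) (t'.takeWhile p) ∧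
      List.Forall₂ Q (t.dropWhile p) (t'.dropWhile p) := by
  induction h with
  | nil => simp
  | @cons x y xs ys hxy hrest ih =>
    by_cases hpx : p x
    · have hpy : p y := by rw [← hp x y hxy]; exact hpx
      rw [List.takeWhile_cons_of_pos hpx, List.takeWhile_cons_of_pos hpy,
        List.dropWhile_cons_of_pos hpx, List.dropWhile_cons_of_pos hpy]
      exact ⟨List.Forall₂.cons hxy ih.1, ih.2⟩
    · have hpy : ¬ p y := by rw [← hp x y hxy]; exact hpx
      rw [List.takeWhile_cons_of_neg hpx, List.takeWhile_cons_of_neg hpy,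
        List.dropWhile_cons_of_neg hpx, List.dropWhile_cons_of_neg hpy]
      exact ⟨List.Forall₂.nil, List.Forall₂.cons hxy hrest⟩

theorem forall2_drop_one {α : Type} {Q : α → α → Prop} {t t' : List α}
    (h : List.Forall₂ Q t t') : List.Forall₂ Q (t.drop 1) (t'.drop 1) := by
  cases h with
  | nil => exact List.Forall₂.nil
  | cons _ hrest => simpa using hrest

-- "chaff" relation: u and v are equal or both strictly below every element of bs
def Rc (bs : List Int) (u v : Int) : Prop := u = v ∨ ((∀ b ∈ bs, u < b) ∧ (∀ b ∈ bs, v < b))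

theorem Rc_mono {b : Int} {bs : List Int} {x y : Int} (h : Rc (b :: bs) x y) : Rc bs x y := by
  rcases h with rfl | ⟨hx, hy⟩
  · exact Or.inl rfl
  · exact Or.inr ⟨fun c hc => hx c (by simp [hc]), fun c hc => hy c (by simp [hc])⟩

-- elements interchangeable below everything still to come do not change M
theorem M_chaff : ∀ (bs t t' : List Int), List.Forall₂ (Rc bs) t t' → M t bs = M t' bs := by
  intro bs
  induction bs with
  | nil => intro t t' _; rfl
  | cons b bs ih =>
    intro t t' h
    have hW : ∀ x y, Rc (b :: bs) x y →
        (fun x => decide (b ≤ x)) x = (fun x => decide (b ≤ x)) y := by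
      intro x y hxy
      rcases hxy with rfl | ⟨hx, hy⟩
      · rfl
      · have h1 : ¬ b ≤ x := not_le.mpr (hx b (by simp))
        have h2 : ¬ b ≤ y := not_le.mpr (hy b (by simp))
        simp [h1, h2]
    obtain ⟨htk, hdr⟩ := forall2_takeWhile_dropWhile h hW
    cases hd : t.dropWhile (fun x => decide (b ≤ x)) with
    | nil =>
      have hd' : t'.dropWhile (fun x => decide (b ≤ x)) = [] := by
        rw [hd] at hdr; exact List.forall₂_nil_left_iff.mp hdr
      simp only [M, hd, hd']
      exact ih _ _ (forall2_drop_one (h.imp (fun _ _ hxy => Rc_mono hxy)))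
    | cons w t2' =>
      rw [hd] at hdr
      rcases List.forall₂_cons_left_iff.mp hdr with ⟨w', t2'', hww', hrest, hd'⟩
      simp only [M, hd, hd']
      have : M (t.takeWhile (fun x => decide (b ≤ x)) ++ t2')
               (bs) = M (t'.takeWhile (fun x => decide (b ≤ x)) ++ t2'') bs := by
        apply ih
        exact List.rel_append (htk.imp (fun _ _ hxy => Rc_mono hxy))
          (hrest.imp (fun _ _ hxy => Rc_mono hxy))
      rw [this]

-- removing the maximum (head of a descending list) does not change M while there is slack
theorem M_dropMax : ∀ (bs t : List Int), t.Pairwise (fun x y => y ≤ x) →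
    bs.length < t.length → M (t.drop 1) bs = M t bs := by
  intro bs
  induction bs with
  | nil => intro t _ _; rfl
  | cons b bs ih =>
    intro t ht hlen
    cases t with
    | nil => simp at hlen
    | cons m r =>
      rw [List.pairwise_cons] at ht
      obtain ⟨hm, hr⟩ := ht
      simp only [List.drop_succ_cons, List.drop_zero]
      by_cases hbm : b ≤ m
      · cases hd : r.dropWhile (fun x => decide (b ≤ x)) with
        | nil =>
          have h1 : M (m :: r) (b :: bs) = M r bs := by
            simp only [M, List.dropWhile_cons]
            simp [hbm, hd]
          have h2 : M r (b :: bs) = M (r.drop 1) bs := by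
            simp only [M, hd]
          rw [h1, h2]
          exact ih r hr (by simp at hlen ⊢; omega)
        | cons w t2' =>
          have h1 : M (m :: r) (b :: bs)
              = 1 + M (m :: (r.takeWhile (fun x => decide (b ≤ x)) ++ t2')) bs := by
            simp only [M, List.dropWhile_cons, List.takeWhile_cons]
            simp [hbm, hd]
          have h2 : M r (b :: bs) = 1 + M (r.takeWhile (fun x => decide (b ≤ x)) ++ t2') bs := by
            simp only [M]; rw [hd]
          rw [h1, h2]
          congr 1
          have hsub : (r.takeWhile (fun x => decide (b ≤ x)) ++ t2').Sublist r := by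
            have h3 : (r.takeWhile (fun x => decide (b ≤ x)) ++ t2').Sublist
                (r.takeWhile (fun x => decide (b ≤ x)) ++ r.dropWhile (fun x => decide (b ≤ x))) := by
              rw [hd]
              exact List.Sublist.append_left (List.sublist_cons_self w t2') _
            rwa [List.takeWhile_append_dropWhile] at h3
          have hlen2 : (r.takeWhile (fun x => decide (b ≤ x))).length + t2'.length + 1
              = r.length := by
            have := congrArg List.length (List.takeWhile_append_dropWhile
              (p := fun x => decide (b ≤ x)) (l := r))
            rw [hd] at this
            simp at this
            omega
          have := ih (m :: (r.takeWhile (fun x => decide (b ≤ x)) ++ t2'))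
            (List.pairwise_cons.mpr ⟨fun y hy => hm y (hsub.subset hy), hr.sublist hsub⟩)
            (by simp only [List.length_cons, List.length_append] at hlen ⊢; omega)
          simpa using this
      · cases r with
        | nil => simp at hlen
        | cons w r' =>
          have hwm : w ≤ m := hm w (by simp)
          have h1 : M (m :: w :: r') (b :: bs) = 1 + M (w :: r') bs := by
            simp only [M, List.dropWhile_cons, List.takeWhile_cons]
            simp [hbm]
          have h2 : M (w :: r') (b :: bs) = 1 + M r' bs := by
            have hbw : ¬ b ≤ w := by omega
            simp only [M, List.dropWhile_cons, List.takeWhile_cons]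
            simp [hbw]
          rw [h1, h2]
          congr 1
          have := ih (w :: r') hr (by simp at hlen ⊢; omega)
          simpa using this

theorem dropWhile_head_lt {b : Int} {t : List Int} {w : Int} {t2' : List Int}
    (hd : t.dropWhile (fun x => decide (b ≤ x)) = w :: t2') : w < b := by
  have hdne : t.dropWhile (fun x => decide (b ≤ x)) ≠ [] := by rw [hd]; simp
  have hh := List.head_dropWhile_not (fun x => decide (b ≤ x)) hdne
  have h1 : (t.dropWhile (fun x => decide (b ≤ x))).head? = some w := by rw [hd]; rfl
  rw [List.head?_eq_some_head hdne] at h1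
  rw [Option.some_inj.mp h1] at hh
  simp at hh
  omega

-- the greedy M on the reversed (descending) list equals the two-pointer sweep g
theorem M_eq_g : ∀ (bs a : List Int), a.Pairwise (· ≤ ·) → bs.Pairwise (· ≤ ·) →
    bs.length ≤ a.length → M a.reverse bs = g a bs := by
  intro bs
  induction bs with
  | nil =>
    intro a _ _ _
    cases a <;> simp [M, g]
  | cons b bs ih =>
    intro a ha hbs hlen
    cases a with
    | nil => simp at hlen
    | cons x a' =>
      obtain ⟨hx, ha'⟩ := List.pairwise_cons.mp ha
      obtain ⟨hb, hbs'⟩ := List.pairwise_cons.mp hbs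
      have htdesc : ((x :: a').reverse).Pairwise (fun u v => v ≤ u) :=
        List.pairwise_reverse.mpr ha
      by_cases hxb : x < b
      · -- win case
        have hlastx : (x :: a').reverse = a'.reverse ++ [x] := by
          simp [List.reverse_cons]
        have hxt : x ∈ (x :: a').reverse := by simp
        have hdne : ((x :: a').reverse).dropWhile (fun y => decide (b ≤ y)) ≠ [] := by
          intro hnil
          have := List.dropWhile_eq_nil_iff.mp hnil x hxt
          simp at this
          omega
        obtain ⟨w, t2', hd⟩ := List.exists_cons_of_ne_nil hdne
        have hM : M ((x :: a').reverse) (b :: bs)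
            = 1 + M (((x :: a').reverse).takeWhile (fun y => decide (b ≤ y)) ++ t2') bs := by
          simp only [M]; rw [hd]
        have hg : g (x :: a') (b :: bs) = 1 + g a' bs := by
          simp [g, hxb]
        -- all elements of the dropWhile suffix are < b
        have hdesc2 : (w :: t2').Pairwise (fun u v => v ≤ u) :=
          htdesc.sublist (hd ▸ List.dropWhile_sublist _)
        have hwb : w < b := dropWhile_head_lt hd
        have hwlt : ∀ y ∈ w :: t2', y < b := by
          intro y hy
          rcases List.mem_cons.mp hy with rfl | hy'
          · exact hwb
          · have : y ≤ w := (List.pairwise_cons.mp hdesc2).1 y hy'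
            omega
        have hTdecomp : (x :: a').reverse
            = ((x :: a').reverse).takeWhile (fun y => decide (b ≤ y)) ++ (w :: t2') := by
          rw [← hd, List.takeWhile_append_dropWhile]
        have hdrop : ((x :: a').reverse).dropLast = a'.reverse := by
          rw [hlastx, List.dropLast_concat]
        have hdrop2 : ((x :: a').reverse).dropLast
            = ((x :: a').reverse).takeWhile (fun y => decide (b ≤ y)) ++ (w :: t2').dropLast := by
          conv_lhs => rw [hTdecomp]
          exact List.dropLast_append_cons
        have key : M (((x :: a').reverse).takeWhile (fun y => decide (b ≤ y)) ++ t2') bs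
            = M (((x :: a').reverse).takeWhile (fun y => decide (b ≤ y)) ++ (w :: t2').dropLast) bs := by
          apply M_chaff
          apply List.rel_append
          · exact List.forall₂_same.mpr (fun y _ => Or.inl rfl)
          · apply forall2_of_mem
            · simp
            · intro u hu v hv
              refine Or.inr ⟨fun c hc => ?_, fun c hc => ?_⟩
              · have h1 : u < b := hwlt u (by simp [hu])
                have h2 : b ≤ c := hb c hc
                omega
              · have hv' : v ∈ w :: t2' := (List.dropLast_sublist _).subset hv
                have h1 : v < b := hwlt v hv'
                have h2 : b ≤ c := hb c hc
                omega
        rw [hM, hg, key, ← hdrop2, hdrop]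
        rw [ih a' ha' hbs' (by simp at hlen ⊢; omega)]
      · -- loss case
        have hge : ∀ y ∈ (x :: a').reverse, b ≤ y := by
          intro y hy
          rw [List.mem_reverse] at hy
          rcases List.mem_cons.mp hy with rfl | hy'
          · omega
          · have := hx y hy'
            omega
        have hd : ((x :: a').reverse).dropWhile (fun y => decide (b ≤ y)) = [] :=
          List.dropWhile_eq_nil_iff.mpr (fun y hy => by simpa using hge y hy)
        have hM : M ((x :: a').reverse) (b :: bs) = M (((x :: a').reverse).drop 1) bs := by
          simp only [M]; rw [hd]
        have hg : g (x :: a') (b :: bs) = g (x :: a') bs := by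
          simp [g, hxb]
        rw [hM, hg, M_dropMax bs _ htdesc (by simp at hlen ⊢; omega)]
        exact ih (x :: a') ha hbs' (by simp at hlen ⊢; omega)

-- the backward scan of find_index, parametrised by how far the range still reaches
theorem findLoop_scan (b : Int) (t : List Int) (k : Nat) (hk : k ≤ t.length)
    (hsucc : ∀ i : Nat, (hi : i < t.length) → i < k → b ≤ t[i])
    (hfail : ∀ i : Nat, (hi : i < t.length) → k ≤ i → ¬ b ≤ t[i]) :
    ∀ (d j : Nat), j = k + d → j ≤ t.length →
      findLoop b t (PySem.List.pyRange ((j : Int) - 1) (-1) (-1)) =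
        (if k = 0 then 0 else if k = t.length then 0 else (k : Int)) := by
  intro d
  induction d with
  | zero =>
    intro j hj hjle
    have hj' : j = k := by omega
    subst hj'
    by_cases hk0 : j = 0
    · subst hk0
      rw [PySem.List.pyRange_neg_one_eq_nil (by norm_num)]
      simp [findLoop]
    · rw [PySem.List.pyRange_neg_one_cons (by omega : (-1 : Int) < (j : Int) - 1)]
      rw [findLoop]
      have hkn : j - 1 < t.length := by omega
      have htn : ((j : Int) - 1).toNat = j - 1 := by omega
      have hget : PySem.List.pyGetD t ((j : Int) - 1) 0 = t[j - 1] := by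
        rw [PySem.List.pyGetD_eq_getElem t 0 (by omega) (by omega)]
        congr 1
      rw [hget, if_pos (hsucc (j - 1) hkn (by omega))]
      by_cases hkn' : j = t.length
      · rw [if_pos (by push_cast [hkn']; ring), if_neg hk0, if_pos hkn']
      · rw [if_neg (by
          intro hcontra
          have : (j : Int) = (t.length : Int) := by omega
          exact hkn' (by exact_mod_cast this))]
        rw [if_neg hk0, if_neg hkn']
        omega
  | succ d ihd =>
    intro j hj hjle
    rw [PySem.List.pyRange_neg_one_cons (by omega : (-1 : Int) < (j : Int) - 1)]
    rw [findLoop]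
    have hjn : j - 1 < t.length := by omega
    have htn : ((j : Int) - 1).toNat = j - 1 := by omega
    have hget : PySem.List.pyGetD t ((j : Int) - 1) 0 = t[j - 1] := by
      rw [PySem.List.pyGetD_eq_getElem t 0 (by omega) (by omega)]
      congr 1
    rw [hget, if_neg (hfail (j - 1) hjn (by omega))]
    have hcast : (j : Int) - 1 - 1 = ((j - 1 : Nat) : Int) - 1 := by omega
    rw [hcast]
    exact ihd (j - 1) (by omega) (by omega)

-- find_index on a nonempty descending list returns k = |takeWhile (b ≤ ·)| unless k = 0 or k = n
theorem find_index_char (b : Int) (t : List Int) (ht : t.Pairwise (fun x y => y ≤ x)) :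
    find_index b t =
      (if (t.takeWhile (fun x => decide (b ≤ x))).length = 0 then 0
       else if (t.takeWhile (fun x => decide (b ≤ x))).length = t.length then 0
       else ((t.takeWhile (fun x => decide (b ≤ x))).length : Int)) := by
  have hk : (t.takeWhile (fun x => decide (b ≤ x))).length ≤ t.length :=
    (List.takeWhile_sublist _).length_le
  have hsucc : ∀ i : Nat, (hi : i < t.length) →
      i < (t.takeWhile (fun x => decide (b ≤ x))).length → b ≤ t[i] := by
    intro i hi hik
    have hpre := List.takeWhile_prefix (l := t) (fun x => decide (b ≤ x))
    have heq : (t.takeWhile (fun x => decide (b ≤ x)))[i]'hik = t[i] := hpre.getElem hik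
    have hmem : (t.takeWhile (fun x => decide (b ≤ x)))[i]'hik
        ∈ t.takeWhile (fun x => decide (b ≤ x)) := List.getElem_mem _
    have := List.mem_takeWhile_imp hmem
    rw [heq] at this
    simpa using this
  have hfail : ∀ i : Nat, (hi : i < t.length) →
      (t.takeWhile (fun x => decide (b ≤ x))).length ≤ i → ¬ b ≤ t[i] := by
    intro i hi hki
    have hkn : (t.takeWhile (fun x => decide (b ≤ x))).length < t.length :=
      lt_of_le_of_lt hki hi
    have hdne : t.dropWhile (fun x => decide (b ≤ x)) ≠ [] := by
      intro h0
      have := congrArg List.length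
        (List.takeWhile_append_dropWhile (p := fun x => decide (b ≤ x)) (l := t))
      rw [h0] at this
      simp at this
      omega
    obtain ⟨w, t2', hd⟩ := List.exists_cons_of_ne_nil hdne
    have hwb : w < b := dropWhile_head_lt hd
    have hgetk : t[(t.takeWhile (fun x => decide (b ≤ x))).length]'hkn = w := by
      have hdecomp : t = t.takeWhile (fun x => decide (b ≤ x)) ++ (w :: t2') := by
        rw [← hd, List.takeWhile_append_dropWhile]
      rw [List.getElem_of_eq hdecomp hkn,
        List.getElem_append_right (Nat.le_refl _)]
      simp
    have hik : t[i] ≤ t[(t.takeWhile (fun x => decide (b ≤ x))).length]'hkn := by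
      rcases Nat.eq_or_lt_of_le hki with heq | hlt
      · simp [← heq]
      · exact (List.pairwise_iff_getElem.mp ht) _ _ hkn hi hlt
    rw [hgetk] at hik
    omega
  have := findLoop_scan b t (t.takeWhile (fun x => decide (b ≤ x))).length hk hsucc hfail
    (t.length - (t.takeWhile (fun x => decide (b ≤ x))).length) t.length (by omega) (Nat.le_refl _)
  unfold find_index
  exact this

-- A's fold equals M
theorem foldA : ∀ (bs t : List Int) (ans : Int), t.Pairwise (fun x y => y ≤ x) →
    bs.length ≤ t.length →
    (bs.foldl (fun (st : List Int × Int) myNum =>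
      let targetIdx := find_index myNum st.1
      let answer := if PySem.List.pyGetD st.1 targetIdx 0 < myNum then st.2 + 1 else st.2
      let target' := ((PySem.List.pop? st.1 targetIdx).map Prod.snd).getD st.1
      (target', answer)) (t, ans)).2 = ans + M t bs := by
  intro bs
  induction bs with
  | nil => intro t ans _ _; simp [M]
  | cons b bs ih =>
    intro t ans ht hlen
    cases t with
    | nil => simp at hlen
    | cons m r =>
      rw [List.foldl_cons]
      cases hd : (m :: r).dropWhile (fun x => decide (b ≤ x)) with
      | nil =>
        have hall : ∀ y ∈ m :: r, b ≤ y := by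
          intro y hy
          simpa using List.dropWhile_eq_nil_iff.mp hd y hy
        have hktop : ((m :: r).takeWhile (fun x => decide (b ≤ x))).length = (m :: r).length := by
          have := congrArg List.length
            (List.takeWhile_append_dropWhile (p := fun x => decide (b ≤ x)) (l := m :: r))
          rw [hd] at this
          simpa using this
        have hidx : find_index b (m :: r) = 0 := by
          rw [find_index_char b _ ht]
          rw [if_neg (by simp [hktop]), if_pos hktop]
        dsimp only
        rw [hidx, PySem.List.pyGetD_zero_cons, PySem.List.pop?_zero_cons,
          if_neg (not_lt.mpr (hall m (by simp)))]
        simp only [Option.map_some, Option.getD_some]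
        rw [ih r ans (List.pairwise_cons.mp ht).2 (by simp at hlen ⊢; omega)]
        have hM : M (m :: r) (b :: bs) = M r bs := by
          simp only [M]
          rw [hd]
          rfl
        rw [hM]
      | cons w t2' =>
        have hwb : w < b := dropWhile_head_lt hd
        have hlen2 : ((m :: r).takeWhile (fun x => decide (b ≤ x))).length + t2'.length + 1
            = (m :: r).length := by
          have := congrArg List.length
            (List.takeWhile_append_dropWhile (p := fun x => decide (b ≤ x)) (l := m :: r))
          rw [hd] at this
          simp only [List.length_append, List.length_cons] at this ⊢
          omega
        have hkne : ((m :: r).takeWhile (fun x => decide (b ≤ x))).length ≠ (m :: r).length := by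
          intro heq
          rw [heq] at hlen2
          omega
        have hidx : find_index b (m :: r)
            = (((m :: r).takeWhile (fun x => decide (b ≤ x))).length : Int) := by
          rw [find_index_char b _ ht]
          by_cases hk0 : ((m :: r).takeWhile (fun x => decide (b ≤ x))).length = 0
          · rw [if_pos hk0]
            simp [hk0]
          · rw [if_neg hk0, if_neg hkne]
        have hklt : ((m :: r).takeWhile (fun x => decide (b ≤ x))).length < (m :: r).length :=
          hlen2 ▸ Nat.lt_succ_of_le (Nat.le_add_right _ _)
        have hdecomp : m :: r = (m :: r).takeWhile (fun x => decide (b ≤ x)) ++ (w :: t2') := by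
          rw [← hd, List.takeWhile_append_dropWhile]
        have hgetk : (m :: r)[((m :: r).takeWhile (fun x => decide (b ≤ x))).length]'hklt = w := by
          rw [List.getElem_of_eq hdecomp hklt,
            List.getElem_append_right (Nat.le_refl _)]
          simp
        have her : (m :: r).eraseIdx ((m :: r).takeWhile (fun x => decide (b ≤ x))).length
            = (m :: r).takeWhile (fun x => decide (b ≤ x)) ++ t2' := by
          have key : ∀ (tk : List Int), tk ++ (w :: t2') = m :: r →
              (m :: r).eraseIdx tk.length = tk ++ t2' := by
            intro tk hteq
            rw [← hteq, List.eraseIdx_eq_take_drop_succ]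
            congr 1
            · exact List.take_left
            · rw [show tk.length + 1 = (tk ++ [w]).length by simp,
                show tk ++ w :: t2' = (tk ++ [w]) ++ t2' by simp, List.drop_left]
          exact key _ hdecomp.symm
        dsimp only
        rw [hidx, PySem.List.pyGetD_natCast,
          List.getD_eq_getElem _ _ hklt, hgetk,
          PySem.List.pop?_natCast _ _ hklt, her, if_pos hwb]
        simp only [Option.map_some, Option.getD_some]
        have hsub : ((m :: r).takeWhile (fun x => decide (b ≤ x)) ++ t2').Sublist (m :: r) := by
          have h3 : ((m :: r).takeWhile (fun x => decide (b ≤ x)) ++ t2').Sublist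
              ((m :: r).takeWhile (fun x => decide (b ≤ x)) ++ (m :: r).dropWhile (fun x => decide (b ≤ x))) := by
            rw [hd]
            exact List.Sublist.append_left (List.sublist_cons_self w t2') _
          rwa [List.takeWhile_append_dropWhile] at h3
        rw [ih _ (ans + 1) (ht.sublist hsub) (by
          have h5 : bs.length + 1 ≤ (m :: r).length := by simpa using hlen
          rw [← hlen2] at h5
          simpa [List.length_append] using Nat.le_of_succ_le_succ h5)]
        have hM : M (m :: r) (b :: bs)
            = 1 + M ((m :: r).takeWhile (fun x => decide (b ≤ x)) ++ t2') bs := by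
          simp only [M]
          rw [hd]
        rw [hM]
        ring

-- B's fold equals g
theorem foldB (targets : List Int) : ∀ (bs : List Int) (i : Nat) (wins : Int),
    (bs.foldl (fun (st : Int × Int) b =>
      if st.1 < (targets.length : Int) ∧ PySem.List.pyGetD targets st.1 0 < b
      then (st.1 + 1, st.2 + 1) else st) ((i : Int), wins)).2
    = wins + g (targets.drop i) bs := by
  intro bs
  induction bs with
  | nil =>
    intro i wins
    cases hdrop : targets.drop i <;> simp [g]
  | cons b bs ih =>
    intro i wins
    rw [List.foldl_cons]
    dsimp only
    by_cases hi : i < targets.length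
    · have hdrop : targets.drop i = targets[i] :: targets.drop (i + 1) :=
        List.drop_eq_getElem_cons hi
      have hget : PySem.List.pyGetD targets (i : Int) 0 = targets[i] := by
        rw [PySem.List.pyGetD_natCast, List.getD_eq_getElem _ _ hi]
      by_cases hxb : targets[i] < b
      · rw [if_pos ⟨by exact_mod_cast hi, by rw [hget]; exact hxb⟩]
        rw [show ((i : Int) + 1) = ((i + 1 : Nat) : Int) by push_cast; ring]
        rw [ih (i + 1) (wins + 1), hdrop]
        have hgeq : g (targets[i] :: targets.drop (i + 1)) (b :: bs)
            = 1 + g (targets.drop (i + 1)) bs := by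
          simp only [g]
          rw [if_pos hxb]
        rw [hgeq]
        ring
      · rw [if_neg (by rw [hget]; rintro ⟨_, h⟩; exact hxb h)]
        rw [ih i wins, hdrop]
        have hgeq : g (targets[i] :: targets.drop (i + 1)) (b :: bs)
            = g (targets[i] :: targets.drop (i + 1)) bs := by
          simp only [g]
          rw [if_neg hxb]
        rw [hgeq]
    · have hdrop : targets.drop i = [] := List.drop_eq_nil_iff.mpr (by omega)
      rw [if_neg (by rintro ⟨h1, _⟩; exact hi (by exact_mod_cast h1))]
      rw [ih i wins, hdrop]
      have hgeq : g ([] : List Int) (b :: bs) = g [] bs := by simp only [g]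
      rw [hgeq]

theorem sorted_rev_eq_reverse (A : List Int) :
    PySem.List.sorted A (fun x => x) true = (PySem.List.sorted A (fun x => x) false).reverse := by
  have h1 : (PySem.List.sorted A (fun x => x) true).reverse
      = PySem.List.sorted A (fun x => x) false := by
    apply PySem.List.eq_of_perm_of_pairwise_le_of_injective (fun x => x)
      (fun a b h => h)
    · exact ((PySem.List.sorted A _ true).reverse_perm.trans
        (PySem.List.sorted_perm A _ true)).trans (PySem.List.sorted_perm A _ false).symm
    · exact List.pairwise_reverse.mpr (PySem.List.sorted_pairwise_rev A _)
    · exact PySem.List.sorted_pairwise A _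
  rw [← h1, List.reverse_reverse]

-- ===== VERDICT (by name: the statement is the Claim_ definition above) =====
theorem solution_spec : Claim_equal_solution := by
  intro A B _ hPre
  unfold Spec_solution
  unfold Pre_solution at hPre
  unfold solution solution_alt
  rw [sorted_rev_eq_reverse A]
  rw [foldA (PySem.List.sorted B (fun x => x) false)
    ((PySem.List.sorted A (fun x => x) false).reverse) 0
    (List.pairwise_reverse.mpr (PySem.List.sorted_pairwise A _))
    (by simp [PySem.List.length_sorted]; omega)]
  have hB := foldB (PySem.List.sorted A (fun x => x) false)
    (PySem.List.sorted B (fun x => x) false) 0 0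
  simp only [Nat.cast_zero, List.drop_zero] at hB
  rw [hB]
  rw [M_eq_g (PySem.List.sorted B (fun x => x) false) (PySem.List.sorted A (fun x => x) false)
    (PySem.List.sorted_pairwise A _) (PySem.List.sorted_pairwise B _)
    (by simp [PySem.List.length_sorted]; omega)]
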